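-- pv_equiv track=rewrite | github.com/topaccina/bee-quiz | regenerate_questions_from_csv.py | reorder_options_balanced
-- ===== SOURCE A (Python) =====
-- def reorder_options_balanced(
--     options: list[str], correct_one_based: int, question_index: int
-- ) -> tuple[list[str], int]:
--     """correct_one_based: 1..4 from CSV. Returns (new_options, new_correct_index 0..3)."""
--     if len(options) != 4:
--         raise ValueError("Expected 4 options")
--     if not 1 <= correct_one_based <= 4:
--         raise ValueError(f"Invalid correct index: {correct_one_based}")
--     old_correct_idx = correct_one_based - 1
--     correct_text = options[old_correct_idx]
--     wrong_indices = [i for i in range(4) if i != old_correct_idx]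
--     wrongs = [options[i] for i in wrong_indices]
--     target = question_index % 4
--     new_opts: list[str | None] = [None, None, None, None]
--     new_opts[target] = correct_text
--     fill_slots = [i for i in range(4) if i != target]
--     for slot, w in zip(fill_slots, wrongs):
--         new_opts[slot] = w
--     assert all(x is not None for x in new_opts)
--     return [str(x) for x in new_opts], target
-- ===== SOURCE B (Python) =====
-- def reorder_options_balanced(
--     options: list[str], correct_one_based: int, question_index: int
-- ) -> tuple[list[str], int]:
--     """correct_one_based: 1..4 from CSV. Returns (new_options, new_correct_index 0..3)."""
--     if len(options) != 4:
--         raise ValueError("Expected 4 options")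
--     if not 1 <= correct_one_based <= 4:
--         raise ValueError(f"Invalid correct index: {correct_one_based}")
--     idx = correct_one_based - 1
--     target = question_index % 4
--
--     def src(j: int) -> int:
--         # source index in `options` feeding output slot j, computed arithmetically:
--         # the target slot takes the correct option; slot j != target takes the
--         # k-th remaining wrong option where k = j minus one if past the target,
--         # skipping over the correct option's original position.
--         if j == target:
--             return idx
--         k = j if j < target else j - 1
--         return k if k < idx else k + 1
--
--     return [str(options[src(j)]) for j in range(4)], target
-- ===== Notes on version B (the rewrite author's own statement) =====
-- stated objective: alternative
-- what changed: Computes the output as a pure index permutation: a closed-form arithmetic function src(j) maps each output slot directly to its source index in the original options, so no None array, no wrongs list and no slot-filling loop or slicing is built at all.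
import Mathlib
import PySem

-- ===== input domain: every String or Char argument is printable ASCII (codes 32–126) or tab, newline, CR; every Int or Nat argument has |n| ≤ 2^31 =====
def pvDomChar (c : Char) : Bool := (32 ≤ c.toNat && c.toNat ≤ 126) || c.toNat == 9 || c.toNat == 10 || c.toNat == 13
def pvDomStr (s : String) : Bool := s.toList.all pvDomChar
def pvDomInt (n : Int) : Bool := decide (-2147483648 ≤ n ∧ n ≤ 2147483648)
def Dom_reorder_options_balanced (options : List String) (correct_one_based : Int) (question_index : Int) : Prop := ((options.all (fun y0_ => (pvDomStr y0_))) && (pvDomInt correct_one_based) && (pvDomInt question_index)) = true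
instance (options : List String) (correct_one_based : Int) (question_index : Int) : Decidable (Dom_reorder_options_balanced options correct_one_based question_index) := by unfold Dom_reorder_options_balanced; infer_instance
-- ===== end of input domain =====

-- B replaces A's None-slot array and fill loop by a closed-form index permutation (objective: alternative).
-- ===== PORT A =====
-- Both versions raise ValueError when len(options) != 4 or correct_one_based is out of 1..4;
-- Pre_ excludes exactly those inputs, so the fallback value ([], 0) here is never claimed about.
-- list assignment new_opts[i] = v (i known in range) ported as List.set.
def reorder_options_balanced (options : List String) (correct_one_based : Int) (question_index : Int) : List String × Int :=
  if options.length ≠ 4 then ([], 0)          -- raise ValueError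
  else if ¬ (1 ≤ correct_one_based ∧ correct_one_based ≤ 4) then ([], 0)  -- raise ValueError
  else
    let old_correct_idx := correct_one_based - 1
    let correct_text := (PySem.List.pyGet? options old_correct_idx).getD ""  -- in range under Pre_
    let wrong_indices := (PySem.List.pyRange 0 4 1).filter (fun i => i ≠ old_correct_idx)
    let wrongs := wrong_indices.map (fun i => (PySem.List.pyGet? options i).getD "")
    let target := PySem.Int.mod question_index 4
    let new_opts : List (Option String) := [none, none, none, none]
    let new_opts := new_opts.set target.toNat (some correct_text)
    let fill_slots := (PySem.List.pyRange 0 4 1).filter (fun i => i ≠ target)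
    let new_opts := (fill_slots.zip wrongs).foldl (fun acc sw => acc.set sw.1.toNat (some sw.2)) new_opts
    (new_opts.map (fun x => x.getD ""), target)

-- ===== PORT B =====
def reorder_options_balanced_alt (options : List String) (correct_one_based : Int) (question_index : Int) : List String × Int :=
  if options.length ≠ 4 then ([], 0)          -- raise ValueError
  else if ¬ (1 ≤ correct_one_based ∧ correct_one_based ≤ 4) then ([], 0)  -- raise ValueError
  else
    let idx := correct_one_based - 1
    let target := PySem.Int.mod question_index 4
    let src := fun (j : Int) =>
      if j = target then idx
      else
        let k := if j < target then j else j - 1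
        if k < idx then k else k + 1
    ((PySem.List.pyRange 0 4 1).map (fun j => (PySem.List.pyGet? options (src j)).getD ""), target)

-- ===== PRECONDITION & SPEC =====
-- A raises ValueError unless options has exactly 4 elements and correct_one_based is in 1..4.
def Pre_reorder_options_balanced (options : List String) (correct_one_based : Int) (question_index : Int) : Prop :=
  options.length = 4 ∧ 1 ≤ correct_one_based ∧ correct_one_based ≤ 4
instance (options : List String) (correct_one_based : Int) (question_index : Int) : Decidable (Pre_reorder_options_balanced options correct_one_based question_index) := by unfold Pre_reorder_options_balanced; infer_instance
def pvWitness_reorder_options_balanced : List String × Int × Int := (["a", "b", "c", "d"], 2, 7)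

def Spec_reorder_options_balanced (options : List String) (correct_one_based : Int) (question_index : Int) (out : List String × Int) : Prop := out = reorder_options_balanced_alt options correct_one_based question_index
instance (options : List String) (correct_one_based : Int) (question_index : Int) (out : List String × Int) : Decidable (Spec_reorder_options_balanced options correct_one_based question_index out) := by unfold Spec_reorder_options_balanced; infer_instance

-- ===== CLAIM (what is proved, stated in full; the proofs are below) =====
def Claim_equal_reorder_options_balanced : Prop := ∀ (options : List String) (correct_one_based : Int) (question_index : Int), Dom_reorder_options_balanced options correct_one_based question_index → Pre_reorder_options_balanced options correct_one_based question_index → Spec_reorder_options_balanced options correct_one_based question_index (reorder_options_balanced options correct_one_based question_index)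

-- ===== LEMMAS AND PROOFS =====

theorem reorder_eq (options : List String) (correct_one_based : Int) (question_index : Int)
    (hpre : Pre_reorder_options_balanced options correct_one_based question_index) :
    reorder_options_balanced options correct_one_based question_index
      = reorder_options_balanced_alt options correct_one_based question_index := by
  obtain ⟨hlen, hc1, hc4⟩ := hpre
  obtain ⟨o0, o1, o2, o3, rfl⟩ : ∃ a b c d, options = [a, b, c, d] := by
    match options, hlen with
    | [a, b, c, d], _ => exact ⟨a, b, c, d, rfl⟩
  have ht0 : (0 : Int) ≤ question_index % 4 := Int.emod_nonneg _ (by norm_num)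
  have ht4 : question_index % 4 < 4 := Int.emod_lt_of_pos _ (by norm_num)
  have ht : question_index % 4 = 0 ∨ question_index % 4 = 1
      ∨ question_index % 4 = 2 ∨ question_index % 4 = 3 := by omega
  have hc : correct_one_based = 1 ∨ correct_one_based = 2 ∨ correct_one_based = 3 ∨ correct_one_based = 4 := by omega
  rcases hc with rfl | rfl | rfl | rfl <;>
    rcases ht with h | h | h | h <;>
      simp [reorder_options_balanced, reorder_options_balanced_alt, h,
        PySem.List.pyGet?, PySem.List.pyIdx?, PySem.List.pyRange, List.range_succ,
        List.filter, List.zip, List.zipWith, List.foldl, List.set]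

-- ===== VERDICT (by name: the statement is the Claim_ definition above) =====
theorem reorder_options_balanced_spec : Claim_equal_reorder_options_balanced := by
  intro options c q _ hpre
  unfold Spec_reorder_options_balanced
  exact reorder_eq options c q hpre
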